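-- pv_equiv track=rewrite | github.com/KLIEBHAN/pulsescribe | ui/overlay_windows.py | _format_recording_interim_text
-- ===== SOURCE A (Python) =====
-- def _format_recording_interim_text(text: str, max_chars: int = 45) -> str:
--     """Normalize and tail-truncate recording interim text for compact overlays."""
--     if not text:
--         return ""
--
--     normalized_tail_reversed: list[str] = []
--     normalized_length = 0
--     pending_space = False
--     truncated = False
--
--     for char in reversed(text):
--         if char.isspace():
--             if normalized_length > 0:
--                 pending_space = True
--             continue
--
--         if pending_space:
--             normalized_tail_reversed.append(" ")
--             normalized_length += 1
--             pending_space = False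
--
--         normalized_tail_reversed.append(char)
--         normalized_length += 1
--         if max_chars > 0 and normalized_length > max_chars:
--             truncated = True
--             break
--
--     if not normalized_tail_reversed:
--         return ""
--
--     cleaned_tail = "".join(reversed(normalized_tail_reversed))
--     if not truncated:
--         return cleaned_tail
--     if max_chars <= 0:
--         return cleaned_tail
--
--     tail_chars = max_chars - 3
--     if tail_chars <= 0:
--         return "..."
--     return "..." + cleaned_tail[-tail_chars:]
-- ===== SOURCE B (Python) =====
-- def _format_recording_interim_text(text: str, max_chars: int = 45) -> str:
--     """Normalize and tail-truncate recording interim text for compact overlays."""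
--     normalized = " ".join(text.split())
--     if not normalized:
--         return ""
--     if max_chars <= 0:
--         return normalized
--     if len(normalized) <= max_chars:
--         return normalized
--     tail_chars = max_chars - 3
--     if tail_chars <= 0:
--         return "..."
--     return "..." + normalized[-tail_chars:]
-- ===== Notes on version B (the rewrite author's own statement) =====
-- stated objective: simpler
-- what changed: Replaces the reversed char-by-char state machine (pending-space flag, manual length counter, early break, re-reversal) with a library-driven whole-string normalization (space-join of whitespace-split) followed by a single negative-index tail slice.
import Mathlib
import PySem

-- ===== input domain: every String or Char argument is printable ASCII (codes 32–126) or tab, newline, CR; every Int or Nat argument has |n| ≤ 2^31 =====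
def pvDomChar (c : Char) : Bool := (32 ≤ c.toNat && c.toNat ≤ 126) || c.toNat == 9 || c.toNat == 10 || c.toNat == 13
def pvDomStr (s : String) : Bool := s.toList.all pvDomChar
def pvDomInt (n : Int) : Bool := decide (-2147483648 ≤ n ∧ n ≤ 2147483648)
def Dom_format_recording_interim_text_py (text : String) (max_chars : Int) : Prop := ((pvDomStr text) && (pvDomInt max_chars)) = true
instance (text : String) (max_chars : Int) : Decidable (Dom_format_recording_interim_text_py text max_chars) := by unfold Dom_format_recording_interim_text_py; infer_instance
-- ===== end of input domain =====

-- B replaces A's reversed char-by-char state machine by " ".join(text.split()) plus one tail slice (objective: simpler).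

-- ===== PORT A =====
-- the for-loop over reversed(text) with its break, state: (normalized_tail_reversed, normalized_length, pending_space)
def friLoop (maxc : Int) : List Char → List Char → Int → Bool → (List Char × Bool)
  | [], acc, _, _ => (acc, false)
  | c :: rest, acc, len, pending =>
    if PySem.Chars.isspace c then
      friLoop maxc rest acc len (if 0 < len then true else pending)
    else
      let acc1 := if pending then acc ++ [' '] else acc
      let len1 := if pending then len + 1 else len
      let acc2 := acc1 ++ [c]
      let len2 := len1 + 1
      if maxc > 0 ∧ len2 > maxc then (acc2, true) else friLoop maxc rest acc2 len2 false

-- the tail of A after the loop: r = (normalized_tail_reversed, truncated); cleaned_tail = r.1.reverse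
def friAfter (max_chars : Int) (r : List Char × Bool) : String :=
  if r.1 = [] then ""
  else if r.2 = false then String.ofList r.1.reverse
  else if max_chars ≤ 0 then String.ofList r.1.reverse
  else if max_chars - 3 ≤ 0 then "..."
  else "..." ++ String.ofList (PySem.Chars.slice r.1.reverse (some (-(max_chars - 3))) none)

def format_recording_interim_text_py (text : String) (max_chars : Int) : String :=
  if text = "" then ""
  else friAfter max_chars (friLoop max_chars text.toList.reverse [] 0 false)

-- ===== PORT B =====
-- B's branch cascade on the normalized string
def friTrunc (normalized : String) (max_chars : Int) : String :=
  if normalized = "" then ""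
  else if max_chars ≤ 0 then normalized
  else if PySem.Str.len normalized ≤ max_chars then normalized
  else if max_chars - 3 ≤ 0 then "..."
  else "..." ++ PySem.Str.slice normalized (some (-(max_chars - 3))) none

def format_recording_interim_text_py_alt (text : String) (max_chars : Int) : String :=
  friTrunc (PySem.Str.join " " (PySem.Str.split₀ text)) max_chars

-- ===== PRECONDITION & SPEC =====
def Spec_format_recording_interim_text_py (text : String) (max_chars : Int) (out : String) : Prop := out = format_recording_interim_text_py_alt text max_chars
instance (text : String) (max_chars : Int) (out : String) : Decidable (Spec_format_recording_interim_text_py text max_chars out) := by unfold Spec_format_recording_interim_text_py; infer_instance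

-- ===== CLAIM (what is proved, stated in full; the proofs are below) =====
def Claim_equal_format_recording_interim_text_py : Prop := ∀ (text : String) (max_chars : Int), Dom_format_recording_interim_text_py text max_chars → Spec_format_recording_interim_text_py text max_chars (format_recording_interim_text_py text max_chars)

-- ===== LEMMAS AND PROOFS =====

-- word-splitting machine: state = (finished words, current word)
def friRun : List Char → (List (List Char) × List Char) → (List (List Char) × List Char)
  | [], s => s
  | c :: r, (acc, cur) =>
    if PySem.Chars.isspace c then friRun r (acc ++ (if cur = [] then [] else [cur]), [])
    else friRun r (acc, cur ++ [c])

def friFin (s : List (List Char) × List Char) : List (List Char) :=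
  s.1 ++ (if s.2 = [] then [] else [s.2])

def friW (cs : List Char) : List (List Char) := friFin (friRun cs ([], []))

-- forward normalizer spec: fn cs started pending
def friFn : List Char → Bool → Bool → List Char
  | [], _, _ => []
  | c :: r, started, pend =>
    if PySem.Chars.isspace c then friFn r started started
    else (if pend then [' ', c] else [c]) ++ friFn r true false

theorem friRun_append (xs ys : List Char) (s : List (List Char) × List Char) :
    friRun (xs ++ ys) s = friRun ys (friRun xs s) := by
  induction xs generalizing s with
  | nil => rfl
  | cons c r ih =>
    obtain ⟨a, cur⟩ := s
    simp only [List.cons_append, friRun]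
    split_ifs <;> exact ih _

theorem friRun_acc (cs : List Char) (a : List (List Char)) (cur : List Char) :
    friRun cs (a, cur) = (a ++ (friRun cs ([], cur)).1, (friRun cs ([], cur)).2) := by
  induction cs generalizing a cur with
  | nil => simp [friRun]
  | cons c r ih =>
    simp only [friRun]
    split_ifs with h hc
    · rw [ih]; simp
    · rw [ih]; simp only [List.nil_append]; rw [ih [cur] []]; simp
    · exact ih _ _

theorem friRun_nonspace (p : List Char) (hp : ∀ c ∈ p, PySem.Chars.isspace c = false)
    (a : List (List Char)) (cur : List Char) :
    friRun p (a, cur) = (a, cur ++ p) := by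
  induction p generalizing cur with
  | nil => simp [friRun]
  | cons c r ih =>
    simp only [friRun, hp c (by simp)]
    simp only [Bool.false_eq_true, if_false]
    rw [ih (fun d hd => hp d (by simp [hd]))]
    simp

theorem friW_cons_space (c : Char) (r : List Char) (h : PySem.Chars.isspace c = true) :
    friW (c :: r) = friW r := by
  simp [friW, friRun, h]

theorem friRun_snoc_space (xs : List Char) (c : Char) (h : PySem.Chars.isspace c = true) :
    friRun (xs ++ [c]) ([], []) = (friW xs, []) := by
  rw [friRun_append]
  rcases hE : friRun xs ([], []) with ⟨a, cur⟩
  simp [friRun, friFin, friW, h, hE]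

theorem friW_snoc_space (xs : List Char) (c : Char) (h : PySem.Chars.isspace c = true) :
    friW (xs ++ [c]) = friW xs := by
  simp [friW, friRun_snoc_space xs c h, friFin]

theorem friW_words_ne_aux (cs : List Char) : ∀ (a : List (List Char)) (cur : List Char),
    (∀ w ∈ a, w ≠ []) → ∀ w ∈ friFin (friRun cs (a, cur)), w ≠ [] := by
  induction cs with
  | nil =>
    intro a cur ha w hw
    simp only [friRun, friFin] at hw
    rcases List.mem_append.mp hw with h | h
    · exact ha w h
    · split_ifs at h with hc
      · simp at h
      · simp at h; subst h; exact hc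
  | cons c r ih =>
    intro a cur ha w hw
    by_cases h : PySem.Chars.isspace c = true
    · simp only [friRun, h, if_true] at hw
      refine ih _ [] ?_ w hw
      intro v hv
      rcases List.mem_append.mp hv with h' | h'
      · exact ha v h'
      · by_cases hc : cur = []
        · simp [hc] at h'
        · simp at h'; rw [h'.2]; exact hc
    · simp only [friRun, h, Bool.false_eq_true, if_false] at hw
      exact ih _ (cur ++ [c]) ha w hw

theorem friW_words_ne (cs : List Char) : ∀ w ∈ friW cs, w ≠ [] :=
  friW_words_ne_aux cs [] [] (by simp)

theorem friW_cons_nonspace (c : Char) (r : List Char) (h : PySem.Chars.isspace c = false) :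
    friW (c :: r) = (c :: r.takeWhile (fun d => !PySem.Chars.isspace d)) ::
      friW (r.dropWhile (fun d => !PySem.Chars.isspace d)) := by
  have hp : ∀ d ∈ r.takeWhile (fun d => !PySem.Chars.isspace d), PySem.Chars.isspace d = false := by
    intro d hd
    have := List.mem_takeWhile_imp hd
    simpa using this
  have hsplit : r.takeWhile (fun d => !PySem.Chars.isspace d) ++ r.dropWhile (fun d => !PySem.Chars.isspace d) = r :=
    List.takeWhile_append_dropWhile
  have h1 : friRun (c :: r) ([], []) =
      friRun (r.dropWhile (fun d => !PySem.Chars.isspace d)) ([], c :: r.takeWhile (fun d => !PySem.Chars.isspace d)) := by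
    conv_lhs => rw [friRun]
    simp only [h, Bool.false_eq_true, if_false, List.nil_append]
    conv_lhs => rw [← hsplit]
    rw [friRun_append, friRun_nonspace _ hp]
    simp
  rcases hq : r.dropWhile (fun d => !PySem.Chars.isspace d) with _ | ⟨d, q₂⟩
  · rw [friW, h1, hq]
    simp [friW, friRun, friFin]
  · have hd : PySem.Chars.isspace d = true := by
      have := List.head_dropWhile_not (fun d => !PySem.Chars.isspace d) (l := r) (by simp [hq])
      simpa [hq] using this
    rw [friW, h1, hq]
    simp only [friRun, hd, if_true]
    simp only [List.cons_ne_nil, List.nil_append]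
    rw [friRun_acc]
    rw [friW_cons_space d q₂ hd]
    simp [friFin, friW]

theorem friRun_rev_flushed (q : List Char)
    (hq : q = [] ∨ ∃ d q₂, q = d :: q₂ ∧ PySem.Chars.isspace d = true) :
    friRun q.reverse ([], []) = (friW q.reverse, []) := by
  rcases hq with rfl | ⟨d, q₂, rfl, hd⟩
  · simp [friRun, friW, friFin]
  · rw [List.reverse_cons, friRun_snoc_space _ _ hd, friW_snoc_space _ _ hd]

theorem friRw : ∀ (n : Nat) (cs : List Char), cs.length ≤ n →
    friW cs.reverse = (friW cs).reverse.map List.reverse := by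
  intro n
  induction n with
  | zero =>
    intro cs h
    have : cs = [] := List.eq_nil_of_length_eq_zero (Nat.le_zero.mp h)
    subst this
    simp [friW, friRun, friFin]
  | succ n ih =>
    intro cs hlen
    match cs with
    | [] => simp [friW, friRun, friFin]
    | c :: r =>
      by_cases h : PySem.Chars.isspace c = true
      · rw [List.reverse_cons, friW_snoc_space _ _ h, friW_cons_space _ _ h]
        exact ih r (by simpa using Nat.succ_le_succ_iff.mp hlen)
      · have h' : PySem.Chars.isspace c = false := by simpa using h
        have hp : ∀ d ∈ r.takeWhile (fun d => !PySem.Chars.isspace d), PySem.Chars.isspace d = false := by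
          intro d hd; simpa using List.mem_takeWhile_imp hd
        have hsplit : r.takeWhile (fun d => !PySem.Chars.isspace d) ++ r.dropWhile (fun d => !PySem.Chars.isspace d) = r :=
          List.takeWhile_append_dropWhile
        have hqshape : r.dropWhile (fun d => !PySem.Chars.isspace d) = [] ∨
            ∃ d q₂, r.dropWhile (fun d => !PySem.Chars.isspace d) = d :: q₂ ∧ PySem.Chars.isspace d = true := by
          rcases hq : r.dropWhile (fun d => !PySem.Chars.isspace d) with _ | ⟨d, q₂⟩
          · exact Or.inl rfl
          · refine Or.inr ⟨d, q₂, rfl, ?_⟩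
            have := List.head_dropWhile_not (fun d => !PySem.Chars.isspace d) (l := r) (by simp [hq])
            simpa [hq] using this
        have hrev : (c :: r).reverse =
            (r.dropWhile (fun d => !PySem.Chars.isspace d)).reverse ++ (c :: r.takeWhile (fun d => !PySem.Chars.isspace d)).reverse := by
          have hr : r.reverse = (r.dropWhile (fun d => !PySem.Chars.isspace d)).reverse ++ (r.takeWhile (fun d => !PySem.Chars.isspace d)).reverse := by
            rw [← List.reverse_append, hsplit]
          rw [List.reverse_cons, List.reverse_cons, hr]
          simp
        have hlenq : (r.dropWhile (fun d => !PySem.Chars.isspace d)).length ≤ n := by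
          have h1 : (r.dropWhile (fun d => !PySem.Chars.isspace d)).length ≤ r.length := List.length_dropWhile_le _ _
          have h2 : r.length ≤ n := Nat.succ_le_succ_iff.mp hlen
          omega
        have hLHS : friW ((c :: r).reverse) =
            friW ((r.dropWhile (fun d => !PySem.Chars.isspace d)).reverse) ++ [(c :: r.takeWhile (fun d => !PySem.Chars.isspace d)).reverse] := by
          have hnp : ∀ d ∈ (c :: r.takeWhile (fun d => !PySem.Chars.isspace d)).reverse, PySem.Chars.isspace d = false := by
            intro d hd
            simp only [List.mem_reverse] at hd
            rcases List.mem_cons.mp hd with rfl | hd'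
            · exact h'
            · exact hp d hd'
          rw [hrev, friW, friRun_append, friRun_rev_flushed _ hqshape, friRun_nonspace _ hnp]
          simp [friFin, friW]
        rw [hLHS, ih _ hlenq, friW_cons_nonspace c r h']
        simp

theorem friP (r : List Char) :
    friFn r true true = if friFn r false false = [] then [] else ' ' :: friFn r false false := by
  induction r with
  | nil => simp [friFn]
  | cons c s ih =>
    by_cases h : PySem.Chars.isspace c = true
    · simp only [friFn, h, if_true]; exact ih
    · simp [friFn, h]

theorem friFn_word (p : List Char) (hp : ∀ c ∈ p, PySem.Chars.isspace c = false) (q : List Char) :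
    friFn (p ++ q) true false = p ++ friFn q true false := by
  induction p with
  | nil => simp
  | cons c r ih =>
    simp only [List.cons_append, friFn, hp c (by simp), Bool.false_eq_true, if_false]
    simp [ih (fun d hd => hp d (by simp [hd]))]

theorem friJoin_ne (ws : List (List Char)) (h : ∀ w ∈ ws, w ≠ []) (hne : ws ≠ []) :
    PySem.Chars.join [' '] ws ≠ [] := by
  match ws with
  | [] => exact absurd rfl hne
  | [p] => simpa [PySem.Chars.join_singleton] using h p (by simp)
  | p :: q :: rest =>
    rw [PySem.Chars.join_cons_cons]
    have := h p (by simp)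
    intro hc
    simp only [List.append_assoc, List.append_eq_nil_iff] at hc
    exact this hc.1

theorem friFW : ∀ (n : Nat) (cs : List Char), cs.length ≤ n →
    friFn cs false false = PySem.Chars.join [' '] (friW cs) := by
  intro n
  induction n with
  | zero =>
    intro cs h
    have : cs = [] := List.eq_nil_of_length_eq_zero (Nat.le_zero.mp h)
    subst this
    simp [friFn, friW, friRun, friFin, PySem.Chars.join_nil]
  | succ n ih =>
    intro cs hlen
    match cs with
    | [] => simp [friFn, friW, friRun, friFin, PySem.Chars.join_nil]
    | c :: r =>
      by_cases h : PySem.Chars.isspace c = true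
      · rw [friW_cons_space _ _ h]
        simp only [friFn, h, if_true]
        exact ih r (Nat.succ_le_succ_iff.mp hlen)
      · have h' : PySem.Chars.isspace c = false := by simpa using h
        have hp : ∀ d ∈ r.takeWhile (fun d => !PySem.Chars.isspace d), PySem.Chars.isspace d = false := by
          intro d hd; simpa using List.mem_takeWhile_imp hd
        have hsplit : r.takeWhile (fun d => !PySem.Chars.isspace d) ++ r.dropWhile (fun d => !PySem.Chars.isspace d) = r :=
          List.takeWhile_append_dropWhile
        rw [friW_cons_nonspace c r h']
        simp only [friFn, h', Bool.false_eq_true, if_false, List.singleton_append]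
        conv_lhs => rw [← hsplit]
        rw [friFn_word _ hp]
        rcases hq : r.dropWhile (fun d => !PySem.Chars.isspace d) with _ | ⟨d, q₂⟩
        · simp [friFn, PySem.Chars.join_singleton, friW, friRun, friFin]
        · have hd : PySem.Chars.isspace d = true := by
            have := List.head_dropWhile_not (fun d => !PySem.Chars.isspace d) (l := r) (by simp [hq])
            simpa [hq] using this
          have hfnq : friFn (d :: q₂) true false = friFn q₂ true true := by
            simp [friFn, hd]
          rw [hfnq, friP, friW_cons_space _ _ hd]
          have hq₂len : q₂.length ≤ n := by
            have h1 : (r.dropWhile (fun d => !PySem.Chars.isspace d)).length ≤ r.length := List.length_dropWhile_le _ _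
            have h2 : r.length ≤ n := Nat.succ_le_succ_iff.mp hlen
            rw [hq] at h1; simp at h1; omega
          rw [ih q₂ hq₂len]
          rcases hW : friW q₂ with _ | ⟨w, ws⟩
          · simp [PySem.Chars.join_nil, PySem.Chars.join_singleton]
          · have hne : PySem.Chars.join [' '] (friW q₂) ≠ [] :=
              friJoin_ne _ (friW_words_ne q₂) (by rw [hW]; simp)
            rw [hW] at hne
            rw [if_neg hne, PySem.Chars.join_cons_cons]
            simp

theorem friNB (maxc : Int) : ∀ (r acc : List Char) (pending : Bool),
    (pending = true → acc ≠ []) →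
    (maxc ≤ 0 ∨ ((acc ++ friFn r (decide (acc ≠ [])) pending).length : Int) ≤ maxc) →
    friLoop maxc r acc (acc.length : Int) pending
      = (acc ++ friFn r (decide (acc ≠ [])) pending, false) := by
  intro r
  induction r with
  | nil => intro acc pending _ _; simp [friLoop, friFn]
  | cons c rest ih =>
    intro acc pending hinv hbound
    by_cases h : PySem.Chars.isspace c = true
    · have hst : (if (0 : Int) < (acc.length : Int) then true else pending) = decide (acc ≠ []) := by
        rcases acc with _ | ⟨x, xs⟩
        · have hp : pending = false := by
            cases pending
            · rfl
            · exact absurd (hinv rfl) (by simp)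
          simp [hp]
        · simp
      have hfn : friFn (c :: rest) (decide (acc ≠ [])) pending = friFn rest (decide (acc ≠ [])) (decide (acc ≠ [])) := by
        simp [friFn, h]
      rw [hfn] at hbound ⊢
      simp only [friLoop, h, if_true, hst]
      exact ih acc (decide (acc ≠ [])) (fun hp => of_decide_eq_true hp) hbound
    · have h' : PySem.Chars.isspace c = false := by simpa using h
      cases pending with
      | false =>
        have hfn : friFn (c :: rest) (decide (acc ≠ [])) false = c :: friFn rest true false := by
          simp [friFn, h']
        rw [hfn] at hbound ⊢
        simp only [friLoop, h', Bool.false_eq_true, if_false]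
        have hcond : ¬(maxc > 0 ∧ (acc.length : Int) + 1 > maxc) := by
          rcases hbound with hb | hb
          · omega
          · simp only [List.length_append, List.length_cons] at hb
            push_cast at hb
            omega
        rw [if_neg hcond]
        have hlen : (acc.length : Int) + 1 = (((acc ++ [c]).length : Nat) : Int) := by
          simp only [List.length_append, List.length_cons, List.length_nil]; omega
        rw [hlen]
        have hd : (decide (¬acc ++ [c] = [])) = true := by simp
        have hbound2 : maxc ≤ 0 ∨ (((acc ++ [c]) ++ friFn rest (decide (¬acc ++ [c] = [])) false).length : Int) ≤ maxc := by
          rcases hbound with hb | hb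
          · exact Or.inl hb
          · refine Or.inr ?_
            rw [hd]
            simp only [List.length_append, List.length_cons, List.length_nil] at hb ⊢
            omega
        rw [ih (acc ++ [c]) false (by simp) hbound2]
        simp
      | true =>
        have hfn : friFn (c :: rest) (decide (acc ≠ [])) true = ' ' :: c :: friFn rest true false := by
          simp [friFn, h']
        rw [hfn] at hbound ⊢
        simp only [friLoop, h', Bool.false_eq_true, if_false, if_true]
        have hcond : ¬(maxc > 0 ∧ (acc.length : Int) + 1 + 1 > maxc) := by
          rcases hbound with hb | hb
          · omega
          · simp only [List.length_append, List.length_cons] at hb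
            push_cast at hb
            omega
        rw [if_neg hcond]
        have hlen : (acc.length : Int) + 1 + 1 = ((((acc ++ [' ']) ++ [c]).length : Nat) : Int) := by
          simp only [List.length_append, List.length_cons, List.length_nil]; omega
        rw [hlen]
        have hd : (decide (¬(acc ++ [' ']) ++ [c] = [])) = true := by simp
        have hbound2 : maxc ≤ 0 ∨ ((((acc ++ [' ']) ++ [c]) ++ friFn rest (decide (¬(acc ++ [' ']) ++ [c] = [])) false).length : Int) ≤ maxc := by
          rcases hbound with hb | hb
          · exact Or.inl hb
          · refine Or.inr ?_
            rw [hd]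
            simp only [List.length_append, List.length_cons, List.length_nil] at hb ⊢
            omega
        rw [ih ((acc ++ [' ']) ++ [c]) false (by simp) hbound2]
        simp

theorem friBK (maxc : Int) : ∀ (r acc : List Char) (pending : Bool),
    0 < maxc → (pending = true → acc ≠ []) → ((acc.length : Int) ≤ maxc) →
    (maxc < ((acc ++ friFn r (decide (acc ≠ [])) pending).length : Int)) →
    ∃ k : Nat, friLoop maxc r acc (acc.length : Int) pending
        = ((acc ++ friFn r (decide (acc ≠ [])) pending).take k, true)
      ∧ maxc < (k : Int) ∧ k ≤ (acc ++ friFn r (decide (acc ≠ [])) pending).length := by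
  intro r
  induction r with
  | nil =>
    intro acc pending hpos hinv hle hbig
    exfalso
    simp only [friFn, List.append_nil] at hbig
    omega
  | cons c rest ih =>
    intro acc pending hpos hinv hle hbig
    by_cases h : PySem.Chars.isspace c = true
    · have hst : (if (0 : Int) < (acc.length : Int) then true else pending) = decide (acc ≠ []) := by
        rcases acc with _ | ⟨x, xs⟩
        · have hp : pending = false := by
            cases pending
            · rfl
            · exact absurd (hinv rfl) (by simp)
          simp [hp]
        · simp
      have hfn : friFn (c :: rest) (decide (acc ≠ [])) pending = friFn rest (decide (acc ≠ [])) (decide (acc ≠ [])) := by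
        simp [friFn, h]
      rw [hfn] at hbig ⊢
      simp only [friLoop, h, if_true, hst]
      exact ih acc (decide (acc ≠ [])) hpos (fun hp => of_decide_eq_true hp) hle hbig
    · have h' : PySem.Chars.isspace c = false := by simpa using h
      cases pending with
      | false =>
        have hfn : friFn (c :: rest) (decide (acc ≠ [])) false = c :: friFn rest true false := by
          simp [friFn, h']
        rw [hfn] at hbig ⊢
        simp only [friLoop, h', Bool.false_eq_true, if_false]
        by_cases hcond : maxc > 0 ∧ (acc.length : Int) + 1 > maxc
        · rw [if_pos hcond]
          refine ⟨(acc ++ [c]).length, ?_, ?_, ?_⟩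
          · have : acc ++ c :: friFn rest true false = (acc ++ [c]) ++ friFn rest true false := by simp
            rw [this, List.take_left]
          · simp only [List.length_append, List.length_cons, List.length_nil]
            omega
          · simp only [List.length_append, List.length_cons, List.length_nil]
            omega
        · rw [if_neg hcond]
          have hlen : (acc.length : Int) + 1 = (((acc ++ [c]).length : Nat) : Int) := by
            simp only [List.length_append, List.length_cons, List.length_nil]; omega
          rw [hlen]
          have hd : (decide (¬acc ++ [c] = [])) = true := by simp
          have hle2 : (((acc ++ [c]).length : Nat) : Int) ≤ maxc := by
            simp only [List.length_append, List.length_cons, List.length_nil]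
            omega
          have hbig2 : maxc < (((acc ++ [c]) ++ friFn rest (decide (¬acc ++ [c] = [])) false).length : Int) := by
            rw [hd]
            simp only [List.length_append, List.length_cons, List.length_nil] at hbig ⊢
            omega
          obtain ⟨k, hk, hk1, hk2⟩ := ih (acc ++ [c]) false hpos (by simp) hle2 hbig2
          rw [hd] at hk hk2
          refine ⟨k, ?_, hk1, ?_⟩
          · rw [hk]
            have : acc ++ c :: friFn rest true false = (acc ++ [c]) ++ friFn rest true false := by simp
            rw [this]
          · simp only [List.length_append, List.length_cons, List.length_nil] at hk2 ⊢
            omega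
      | true =>
        have hfn : friFn (c :: rest) (decide (acc ≠ [])) true = ' ' :: c :: friFn rest true false := by
          simp [friFn, h']
        rw [hfn] at hbig ⊢
        simp only [friLoop, h', Bool.false_eq_true, if_false, if_true]
        by_cases hcond : maxc > 0 ∧ (acc.length : Int) + 1 + 1 > maxc
        · rw [if_pos hcond]
          refine ⟨((acc ++ [' ']) ++ [c]).length, ?_, ?_, ?_⟩
          · have : acc ++ ' ' :: c :: friFn rest true false = ((acc ++ [' ']) ++ [c]) ++ friFn rest true false := by simp
            rw [this, List.take_left]
          · simp only [List.length_append, List.length_cons, List.length_nil]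
            omega
          · simp only [List.length_append, List.length_cons, List.length_nil]
            omega
        · rw [if_neg hcond]
          have hlen : (acc.length : Int) + 1 + 1 = ((((acc ++ [' ']) ++ [c]).length : Nat) : Int) := by
            simp only [List.length_append, List.length_cons, List.length_nil]; omega
          rw [hlen]
          have hd : (decide (¬(acc ++ [' ']) ++ [c] = [])) = true := by simp
          have hle2 : ((((acc ++ [' ']) ++ [c]).length : Nat) : Int) ≤ maxc := by
            simp only [List.length_append, List.length_cons, List.length_nil]
            omega
          have hbig2 : maxc < ((((acc ++ [' ']) ++ [c]) ++ friFn rest (decide (¬(acc ++ [' ']) ++ [c] = [])) false).length : Int) := by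
            rw [hd]
            simp only [List.length_append, List.length_cons, List.length_nil] at hbig ⊢
            omega
          obtain ⟨k, hk, hk1, hk2⟩ := ih ((acc ++ [' ']) ++ [c]) false hpos (by simp) hle2 hbig2
          rw [hd] at hk hk2
          refine ⟨k, ?_, hk1, ?_⟩
          · rw [hk]
            have : acc ++ ' ' :: c :: friFn rest true false = ((acc ++ [' ']) ++ [c]) ++ friFn rest true false := by simp
            rw [this]
          · simp only [List.length_append, List.length_cons, List.length_nil] at hk2 ⊢
            omega

theorem friGo (cs : List Char) : ∀ (cur : List Char) (acc : List (List Char)),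
    PySem.Chars.split₀.go cs cur acc = friFin (friRun cs (acc.reverse, cur.reverse)) := by
  induction cs with
  | nil =>
    intro cur acc
    rcases cur with _ | ⟨x, xs⟩
    · simp [PySem.Chars.split₀.go, friRun, friFin]
    · simp [PySem.Chars.split₀.go, friRun, friFin, List.isEmpty]
  | cons c rest ih =>
    intro cur acc
    by_cases h : PySem.Chars.isspace c = true
    · rcases cur with _ | ⟨x, xs⟩
      · simp only [PySem.Chars.split₀.go, h, if_true, List.isEmpty_nil]
        rw [ih [] acc]
        simp [friRun, h]
      · simp only [PySem.Chars.split₀.go, h, if_true, List.isEmpty_cons]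
        rw [ih [] ((x :: xs).reverse :: acc)]
        simp [friRun, h]
    · simp only [PySem.Chars.split₀.go, h, Bool.false_eq_true, if_false]
      rw [ih (c :: cur) acc]
      simp [friRun, h]

theorem friSplit (cs : List Char) : PySem.Chars.split₀ cs = friW cs := by
  rw [PySem.Chars.split₀, friGo cs [] []]
  rfl

theorem friJoin_snoc (ws : List (List Char)) (w : List Char) (h : ws ≠ []) :
    PySem.Chars.join [' '] (ws ++ [w]) = PySem.Chars.join [' '] ws ++ ' ' :: w := by
  induction ws with
  | nil => exact absurd rfl h
  | cons p ws ih =>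
    rcases ws with _ | ⟨q, rest⟩
    · simp [PySem.Chars.join_cons_cons, PySem.Chars.join_singleton]
    · have h2 := ih (by simp)
      simp only [List.cons_append] at h2 ⊢
      rw [PySem.Chars.join_cons_cons, PySem.Chars.join_cons_cons, h2]
      simp

theorem friRj (ws : List (List Char)) :
    (PySem.Chars.join [' '] ws).reverse = PySem.Chars.join [' '] (ws.reverse.map List.reverse) := by
  induction ws with
  | nil => simp [PySem.Chars.join_nil]
  | cons p ws ih =>
    rcases ws with _ | ⟨q, rest⟩
    · simp [PySem.Chars.join_singleton]
    · rw [PySem.Chars.join_cons_cons]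
      have hne : ((q :: rest).reverse.map List.reverse) ≠ [] := by simp
      have : (p :: q :: rest).reverse.map List.reverse = ((q :: rest).reverse.map List.reverse) ++ [p.reverse] := by
        simp
      rw [this, friJoin_snoc _ _ hne, ← ih]
      simp

theorem friSliceNeg (xs : List Char) (t : Nat) (h : 0 < t) (h2 : t ≤ xs.length) :
    PySem.List.slice xs (some (-(t : Int))) none = xs.drop (xs.length - t) := by
  simp only [PySem.List.slice, PySem.List.clampIdx]
  split_ifs with h1 h3
  · simp; omega
  · have e1 : ((xs.length : Int) + -(t : Int)).toNat = xs.length - t := by omega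
    rw [e1]
    have e2 : xs.length - (xs.length - t) = t := by omega
    rw [e2]
    exact List.take_of_length_le (by simp; omega)
  · omega

theorem friBnorm (text : String) :
    PySem.Str.join " " (PySem.Str.split₀ text)
      = String.ofList (PySem.Chars.join [' '] (friW text.toList)) := by
  rw [PySem.Str.join]
  congr 1
  rw [PySem.Str.split₀_map_toList, friSplit]
  rfl

theorem friOfList_ne (l : List Char) (h : l ≠ []) : String.ofList l ≠ "" := by
  intro hc
  exact h (by simpa using congrArg String.toList hc)

-- ===== VERDICT (by name: the statement is the Claim_ definition above) =====
theorem format_recording_interim_text_py_spec : Claim_equal_format_recording_interim_text_py := by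
  intro text maxc _
  unfold Spec_format_recording_interim_text_py
  by_cases ht : text = ""
  · subst ht
    have hW : friW ("" : String).toList = [] := rfl
    rw [format_recording_interim_text_py, if_pos rfl,
      format_recording_interim_text_py_alt, friBnorm, hW, PySem.Chars.join_nil]
    rfl
  · set Nf := PySem.Chars.join [' '] (friW text.toList) with hNf
    have hNr : friFn text.toList.reverse false false = Nf.reverse := by
      rw [friFW text.toList.reverse.length text.toList.reverse le_rfl,
        friRw text.toList.length text.toList le_rfl, ← friRj]
    rw [format_recording_interim_text_py, if_neg ht,
      format_recording_interim_text_py_alt, friBnorm, ← hNf, friTrunc]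
    by_cases hcase : maxc ≤ 0 ∨ ((Nf.length : Int) ≤ maxc)
    · have hbound : maxc ≤ 0 ∨
          ((([] : List Char) ++ friFn text.toList.reverse (decide (([] : List Char) ≠ [])) false).length : Int) ≤ maxc := by
        rcases hcase with hb | hb
        · exact Or.inl hb
        · refine Or.inr ?_
          simp [hNr]
          omega
      have hloop' : friLoop maxc text.toList.reverse [] 0 false = (Nf.reverse, false) := by
        have h1 := friNB maxc text.toList.reverse [] false (by simp) hbound
        simpa [hNr] using h1
      rw [hloop', friAfter]
      by_cases hemp : Nf = []
      · rw [hemp]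
        simp
      · have hr1 : ¬(Nf.reverse, false).1 = [] := by simpa using hemp
        rw [if_neg hr1, if_pos rfl]
        simp only [List.reverse_reverse]
        rw [if_neg (friOfList_ne Nf hemp)]
        rcases hcase with hb | hb
        · rw [if_pos hb]
        · by_cases hb0 : maxc ≤ 0
          · rw [if_pos hb0]
          · rw [if_neg hb0, if_pos (by simp [PySem.Str.len_eq]; omega)]
    · have hpos : 0 < maxc := by
        by_contra h
        exact hcase (Or.inl (by omega))
      have hbig : maxc < (Nf.length : Int) := by
        by_contra h
        exact hcase (Or.inr (by omega))
      have hpos' : 0 < maxc := by omega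
      have hbigL : maxc < ((([] : List Char) ++ friFn text.toList.reverse (decide (([] : List Char) ≠ [])) false).length : Int) := by
        simp [hNr]
        omega
      obtain ⟨k, hk, hk1, hk2⟩ := friBK maxc text.toList.reverse [] false hpos' (by simp) (by simp; omega) hbigL
      simp only [List.nil_append, ne_eq, decide_not, decide_true, Bool.not_true] at hk hk2
      rw [hNr] at hk hk2
      simp only [List.length_reverse] at hk2
      have hloop' : friLoop maxc text.toList.reverse [] 0 false = (Nf.reverse.take k, true) := by
        simpa using hk
      rw [hloop', friAfter]
      have hNfne : Nf ≠ [] := by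
        intro hc
        rw [hc] at hbig
        simp at hbig
        omega
      have htake_ne : ¬(Nf.reverse.take k, true).1 = [] := by
        simp only []
        intro hc
        rcases List.take_eq_nil_iff.mp hc with h | h
        · omega
        · exact hNfne (by simpa using h)
      have hlenB : PySem.Str.len (String.ofList Nf) = (Nf.length : Int) := by
        rw [PySem.Str.len_eq, String.toList_ofList]
      rw [if_neg htake_ne,
        if_neg (by simp : ¬(Nf.reverse.take k, true).2 = false),
        if_neg (by omega : ¬maxc ≤ 0),
        if_neg (friOfList_ne Nf hNfne),
        if_neg (by omega : ¬maxc ≤ 0),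
        if_neg (show ¬PySem.Str.len (String.ofList Nf) ≤ maxc by rw [hlenB]; omega)]
      by_cases htc : maxc - 3 ≤ 0
      · rw [if_pos htc, if_pos htc]
      · rw [if_neg htc, if_neg htc]
        set t : Nat := (maxc - 3).toNat with hts
        have htcast : -(maxc - 3) = -(t : Int) := by omega
        have htpos : 0 < t := by omega
        have htk : t ≤ k := by omega
        have htlen : t ≤ Nf.length := by omega
        have hklen : k ≤ Nf.length := hk2
        have hsliceA : PySem.Chars.slice (Nf.reverse.take k, true).1.reverse (some (-(maxc - 3))) none
            = Nf.drop (Nf.length - t) := by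
          simp only []
          have hclean : ((Nf.reverse.take k).reverse).length = k := by
            simp
            omega
          rw [htcast, PySem.Chars.slice, friSliceNeg _ t htpos (by rw [hclean]; exact htk), hclean]
          have e1 : (Nf.reverse.take k).reverse.drop (k - t) = ((Nf.reverse.take k).take ((Nf.reverse.take k).length - (k - t))).reverse := by
            rw [← List.drop_reverse]
          rw [e1]
          have e2 : (Nf.reverse.take k).length = k := by simp; omega
          rw [e2]
          have e3 : k - (k - t) = t := by omega
          rw [e3, List.take_take]
          have e4 : min t k = t := by omega
          rw [e4, List.take_reverse, List.reverse_reverse]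
        have hsliceB : PySem.Str.slice (String.ofList Nf) (some (-(maxc - 3))) none
            = String.ofList (Nf.drop (Nf.length - t)) := by
          rw [PySem.Str.slice, htcast]
          congr 1
          have hofl : (String.ofList Nf).toList = Nf := by simp
          rw [hofl, PySem.Chars.slice, friSliceNeg _ t htpos htlen]
        rw [hsliceA, hsliceB]
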